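-- pv_equiv track=rewrite | github.com/GuillermoSCB/Msc-Bioinformatics | Algoritmos_Python/PracticasAlgoritmos.py | CalculaPrefijo
-- ===== SOURCE A (Python) =====
-- def CalculaPrefijo(secuencia):
--     """
--     (list) -> int
--     Dada una lista de números enteros, calcula hasta qué posición la lista está ordenada de menor a mayor.
--         Entrada: lista de números enteros.
--         Salida: número entero con la última posición ordenada de la lista (siendo 1 la primera posición).
--     >>> sec = [1, 2, 3, 6, 4, 5]
--     >>> CalculaPrefijo(sec)
--     3
--     """
--
--     minimo = min(secuencia)
--     prefijo = 0
--
--     if secuencia[0] == minimo: # Si el primer valor está ordenado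
--         prefijo = 1
--
--         for i in range(len(secuencia)-1):
--             if secuencia[i+1] - secuencia[i] == 1: # Si el siguiente valor también está ordenado
--                 prefijo += 1
--             else:
--                 return(prefijo)
--     return prefijo
-- ===== SOURCE B (Python) =====
-- def CalculaPrefijo(secuencia):
--     # Binary search for the largest k such that secuencia[:k] equals the
--     # arithmetic list [minimo, minimo+1, ..., minimo+k-1]; the set of matching
--     # k is downward-closed, so the predicate is monotone and bisection applies.
--     minimo = min(secuencia)
--     lo, hi = 0, len(secuencia)
--     while lo < hi:
--         mid = (lo + hi + 1) // 2
--         if secuencia[:mid] == list(range(minimo, minimo + mid)):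
--             lo = mid
--         else:
--             hi = mid - 1
--     return lo
-- ===== Notes on version B (the rewrite author's own statement) =====
-- stated objective: alternative
-- what changed: Replaces A's early-exit linear scan (first==min gate plus adjacent differences) by a binary search for the largest k with secuencia[:k] == list(range(minimo, minimo+k)), exploiting that the set of matching prefix lengths is downward-closed.
import Mathlib
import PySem

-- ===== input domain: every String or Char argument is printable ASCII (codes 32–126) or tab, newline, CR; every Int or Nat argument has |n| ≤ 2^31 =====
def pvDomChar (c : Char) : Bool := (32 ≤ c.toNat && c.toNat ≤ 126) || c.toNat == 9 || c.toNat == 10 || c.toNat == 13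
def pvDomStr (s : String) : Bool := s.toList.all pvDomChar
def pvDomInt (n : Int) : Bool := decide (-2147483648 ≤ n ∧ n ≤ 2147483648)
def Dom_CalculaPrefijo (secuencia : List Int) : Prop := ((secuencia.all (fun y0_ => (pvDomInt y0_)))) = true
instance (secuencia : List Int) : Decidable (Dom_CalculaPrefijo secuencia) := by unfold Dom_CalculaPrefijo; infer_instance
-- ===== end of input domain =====

-- B replaces A's early-exit adjacent-difference scan by a binary search for the largest k
-- with secuencia[:k] = [minimo..minimo+k-1], a downward-closed predicate (objective: alternative).

-- ===== PORT A =====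
-- A's `for i in range(len-1)` reads the adjacent pair (secuencia[i], secuencia[i+1]) and
-- may return early; transcribed as recursion over adjacent pairs with the accumulator.
def CalculaPrefijoLoop : List Int → Int → Int
  | a :: b :: rest, prefijo =>
      if b - a = 1 then CalculaPrefijoLoop (b :: rest) (prefijo + 1) else prefijo
  | _, prefijo => prefijo

def CalculaPrefijo (secuencia : List Int) : Int :=
  match PySem.List.min? secuencia (fun y => y) with
  | none => 0  -- min([]) raises ValueError in Python; excluded by Pre_
  | some minimo =>
    if secuencia.getD 0 0 = minimo then CalculaPrefijoLoop secuencia 1 else 0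

-- ===== PORT B =====
-- while lo < hi: mid = (lo+hi+1)//2; keep mid if secuencia[:mid] == list(range(minimo, minimo+mid))
def CalculaPrefijoAltLoop (secuencia : List Int) (minimo lo hi : Int) : Int :=
  if _h : lo < hi then
    let mid := PySem.Int.floordiv (lo + hi + 1) 2
    if PySem.List.slice secuencia none (some mid) = PySem.List.pyRange minimo (minimo + mid) 1 then
      CalculaPrefijoAltLoop secuencia minimo mid hi
    else
      CalculaPrefijoAltLoop secuencia minimo lo (mid - 1)
  else lo
termination_by (hi - lo).toNat
decreasing_by
  all_goals
    have hb := PySem.Int.floordiv_two_mid_bounds (show lo + 1 ≤ hi by omega)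
    rw [show (lo + 1) + hi = lo + hi + 1 by ring] at hb
    omega

def CalculaPrefijo_alt (secuencia : List Int) : Int :=
  match PySem.List.min? secuencia (fun y => y) with
  | none => 0  -- min([]) raises ValueError in Python; excluded by Pre_
  | some minimo => CalculaPrefijoAltLoop secuencia minimo 0 (secuencia.length : Int)

-- ===== PRECONDITION & SPEC =====
-- Pre_ excludes only the empty list, on which A's min() raises ValueError.
def Pre_CalculaPrefijo (secuencia : List Int) : Prop := secuencia ≠ []
instance (secuencia : List Int) : Decidable (Pre_CalculaPrefijo secuencia) := by
  unfold Pre_CalculaPrefijo; infer_instance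
def pvWitness_CalculaPrefijo : List Int := [1, 2, 3, 6, 4, 5]

def Spec_CalculaPrefijo (secuencia : List Int) (out : Int) : Prop := out = CalculaPrefijo_alt secuencia
instance (secuencia : List Int) (out : Int) : Decidable (Spec_CalculaPrefijo secuencia out) := by unfold Spec_CalculaPrefijo; infer_instance

-- ===== CLAIM (what is proved, stated in full; the proofs are below) =====
def Claim_equal_CalculaPrefijo : Prop := ∀ (secuencia : List Int), Dom_CalculaPrefijo secuencia → Pre_CalculaPrefijo secuencia → Spec_CalculaPrefijo secuencia (CalculaPrefijo secuencia)

-- ===== LEMMAS AND PROOFS =====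

-- Common characterisation: the length of the arithmetic run m, m+1, … at the front.
def prefixLen : Int → List Int → Nat
  | _, [] => 0
  | m, x :: xs => if x = m then prefixLen (m + 1) xs + 1 else 0

lemma prefixLen_le_length (m : Int) (s : List Int) : prefixLen m s ≤ s.length := by
  induction s generalizing m with
  | nil => simp [prefixLen]
  | cons x xs ih =>
    simp only [prefixLen, List.length_cons]
    split_ifs
    · exact Nat.succ_le_succ (ih (m + 1))
    · exact Nat.zero_le _

-- A's adjacent-pair loop computes the accumulator plus the run length after the head.
lemma loopA_eq_prefixLen : ∀ (rest : List Int) (x p : Int),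
    CalculaPrefijoLoop (x :: rest) p = p + (prefixLen (x + 1) rest : Int) := by
  intro rest
  induction rest with
  | nil => intro x p; simp [CalculaPrefijoLoop, prefixLen]
  | cons y rs ih =>
    intro x p
    rw [CalculaPrefijoLoop]
    by_cases hy : y = x + 1
    · rw [if_pos (by omega), ih y (p + 1), prefixLen, if_pos hy, hy]
      push_cast; ring
    · rw [if_neg (by omega), prefixLen, if_neg hy]
      simp

-- A equals prefixLen of the minimum (for a nonempty list).
lemma A_eq_prefijo_aux (x : Int) (xs : List Int) (m : Int)
    (hmin : PySem.List.min? (x :: xs) (fun y => y) = some m) :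
    CalculaPrefijo (x :: xs) = (prefixLen m (x :: xs) : Int) := by
  unfold CalculaPrefijo
  rw [hmin]
  simp only []
  show (if (x :: xs).getD 0 0 = m then CalculaPrefijoLoop (x :: xs) 1 else 0) = (prefixLen m (x :: xs) : Int)
  by_cases hx : x = m
  · rw [if_pos (by simpa using hx), loopA_eq_prefixLen xs x 1, prefixLen, if_pos hx, hx]
    push_cast; ring
  · rw [if_neg (by simpa using hx), prefixLen, if_neg hx]
    simp

-- Prefix of length k matches the arithmetic list iff k ≤ prefixLen.
lemma take_eq_range_iff : ∀ (s : List Int) (m : Int) (k : Nat), k ≤ s.length →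
    (s.take k = (List.range k).map (fun i : Nat => m + (i : Int)) ↔ k ≤ prefixLen m s) := by
  intro s
  induction s with
  | nil =>
    intro m k hk
    have hk0 : k = 0 := by simpa using hk
    subst hk0; simp
  | cons x xs ih =>
    intro m k hk
    cases k with
    | zero => simp
    | succ k =>
      rw [List.range_succ_eq_map, List.map_cons, List.map_map, List.take_succ_cons]
      have hmap : (List.range k).map ((fun i : Nat => m + (i : Int)) ∘ Nat.succ)
          = (List.range k).map (fun i : Nat => (m + 1) + (i : Int)) := by
        apply List.map_congr_left; intro a _
        simp only [Function.comp]; push_cast; ring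
      rw [hmap]
      simp only [List.cons.injEq, Nat.cast_zero, add_zero, prefixLen]
      by_cases hx : x = m
      · rw [if_pos hx]
        have hih := ih (m + 1) k (by simpa using hk)
        constructor
        · rintro ⟨_, h2⟩
          have := hih.mp h2; omega
        · intro h
          exact ⟨hx, hih.mpr (by omega)⟩
      · rw [if_neg hx]
        constructor
        · rintro ⟨h1, _⟩; exact absurd h1 hx
        · omega

-- The bisection loop returns prefixLen whenever [lo, hi] brackets it within the list.
lemma altLoop_correct (s : List Int) (m : Int) :
    ∀ (n : Nat) (lo hi : Int), (hi - lo).toNat = n →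
      0 ≤ lo → lo ≤ (prefixLen m s : Int) → (prefixLen m s : Int) ≤ hi → hi ≤ (s.length : Int) →
      CalculaPrefijoAltLoop s m lo hi = (prefixLen m s : Int) := by
  intro n
  induction n using Nat.strong_induction_on with
  | _ n ih =>
    intro lo hi hn h0 h1 h2 h3
    rw [CalculaPrefijoAltLoop]
    by_cases hlh : lo < hi
    · rw [dif_pos hlh]
      have hb := PySem.Int.floordiv_two_mid_bounds (show lo + 1 ≤ hi by omega)
      rw [show (lo + 1) + hi = lo + hi + 1 by ring] at hb
      set mid := PySem.Int.floordiv (lo + hi + 1) 2 with hmid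
      have hcond : (PySem.List.slice s none (some mid) = PySem.List.pyRange m (m + mid) 1)
          ↔ mid ≤ (prefixLen m s : Int) := by
        rw [PySem.List.slice_to s (by omega), PySem.List.pyRange_one,
            show (m + mid - m) = mid by ring]
        have hiff := take_eq_range_iff s m mid.toNat (by omega)
        constructor
        · intro h; have := hiff.mp h; omega
        · intro h; exact hiff.mpr (by omega)
      by_cases hc : PySem.List.slice s none (some mid) = PySem.List.pyRange m (m + mid) 1
      · rw [if_pos hc]
        exact ih (hi - mid).toNat (by omega) mid hi rfl (by omega) (hcond.mp hc) h2 h3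
      · rw [if_neg hc]
        have hlt : ¬ (mid ≤ (prefixLen m s : Int)) := fun h => hc (hcond.mpr h)
        exact ih (mid - 1 - lo).toNat (by omega) lo (mid - 1) rfl h0 h1 (by omega) (by omega)
    · rw [dif_neg hlh]
      omega

-- ===== VERDICT (by name: the statement is the Claim_ definition above) =====
theorem CalculaPrefijo_spec : Claim_equal_CalculaPrefijo := by
  intro s _ hpre
  unfold Spec_CalculaPrefijo
  cases s with
  | nil => exact absurd rfl hpre
  | cons x xs =>
    cases hmin : PySem.List.min? (x :: xs) (fun y => y) with
    | none =>
      rw [PySem.List.min?_eq_none_iff] at hmin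
      exact absurd hmin (by simp)
    | some m =>
      have hp : prefixLen m (x :: xs) ≤ (x :: xs).length := prefixLen_le_length m (x :: xs)
      rw [A_eq_prefijo_aux x xs m hmin]
      unfold CalculaPrefijo_alt
      rw [hmin]
      show (prefixLen m (x :: xs) : Int)
          = CalculaPrefijoAltLoop (x :: xs) m 0 ((x :: xs).length : Int)
      exact (altLoop_correct (x :: xs) m (((x :: xs).length : Int) - 0).toNat 0
        ((x :: xs).length : Int) rfl (by omega) (by omega) (by omega) (by omega)).symm
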